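-- pv_equiv track=rewrite | github.com/rinjingu/EE4016_project | stat_lib.py | label_string
-- ===== SOURCE A (Python) =====
-- def label_string(items, key):
--     labels = {}
--     i = 0
--     for item in items:
--         if item[key] not in labels:
--             labels[item[key]] = i
--             i += 1
--     return labels
-- ===== SOURCE B (Python) =====
-- def label_string(items, key):
--     vals = [item[key] for item in items]
--     return {v: i for i, v in enumerate(sorted(set(vals), key=vals.index))}
-- ===== Notes on version B (the rewrite author's own statement) =====
-- stated objective: alternative
-- what changed: Instead of A's single streaming loop with a membership test and a running counter, B extracts all key-values, builds their unordered set, sorts the distinct values by first-occurrence index (vals.index) and assigns labels by enumeration.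
import Mathlib
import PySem

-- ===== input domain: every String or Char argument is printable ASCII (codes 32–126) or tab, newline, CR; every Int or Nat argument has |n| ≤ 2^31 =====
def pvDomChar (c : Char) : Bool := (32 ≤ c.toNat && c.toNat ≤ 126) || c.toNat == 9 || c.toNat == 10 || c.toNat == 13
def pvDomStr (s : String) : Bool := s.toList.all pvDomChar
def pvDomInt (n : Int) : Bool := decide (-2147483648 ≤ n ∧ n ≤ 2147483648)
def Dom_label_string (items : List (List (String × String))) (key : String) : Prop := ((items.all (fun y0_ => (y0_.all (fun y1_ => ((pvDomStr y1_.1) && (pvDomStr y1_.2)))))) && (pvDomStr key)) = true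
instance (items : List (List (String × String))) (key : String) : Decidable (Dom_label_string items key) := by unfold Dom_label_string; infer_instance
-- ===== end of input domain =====

-- B replaces A's streaming membership-test-and-counter loop by a set-and-sort algorithm:
-- collect the key-values, take their set, sort the distinct values by first-occurrence
-- index, and label by enumeration (alternative algorithm, similar cost).

-- item[key]: first-match lookup in the association list (Python dict); "" is never read inside Pre_
def pvItemGet (item : List (String × String)) (key : String) : String :=
  (PySem.Dict.mk item).getD key ""

-- ===== PORT A =====
def label_string (items : List (List (String × String))) (key : String) : List (String × Int) :=
  (items.foldl
    (fun (st : PySem.Dict String Int × Int) item =>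
      let v := pvItemGet item key
      if st.1.contains v then st
      else (st.1.insert v st.2, st.2 + 1))
    (PySem.Dict.empty, 0)).1.items

-- ===== PORT B =====
-- vals.index v always succeeds here (v ∈ vals), so .getD 0 is exact for Python's list.index
def label_string_alt (items : List (List (String × String))) (key : String) : List (String × Int) :=
  let vals := items.map (fun item => pvItemGet item key)
  (PySem.List.enumerate
      (PySem.List.sorted (PySem.Set.ofList vals)
        (fun v => (PySem.List.index? vals v).getD 0) false) 0).map
    (fun p => (p.2, p.1))

-- ===== PRECONDITION & SPEC =====
-- Pre_: the key is present in every item (Python raises KeyError otherwise)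
def Pre_label_string (items : List (List (String × String))) (key : String) : Prop :=
  ∀ item ∈ items, key ∈ item.map Prod.fst
instance (items : List (List (String × String))) (key : String) : Decidable (Pre_label_string items key) := by unfold Pre_label_string; infer_instance

def pvWitness_label_string : (List (List (String × String))) × String :=
  ([[("k", "a")], [("k", "b")], [("k", "a")]], "k")

def Spec_label_string (items : List (List (String × String))) (key : String) (out : List (String × Int)) : Prop := out = label_string_alt items key
instance (items : List (List (String × String))) (key : String) (out : List (String × Int)) : Decidable (Spec_label_string items key out) := by unfold Spec_label_string; infer_instance

-- ===== CLAIM (what is proved, stated in full; the proofs are below) =====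
def Claim_equal_label_string : Prop := ∀ (items : List (List (String × String))) (key : String), Dom_label_string items key → Pre_label_string items key → Spec_label_string items key (label_string items key)

-- ===== LEMMAS AND PROOFS =====

-- A's loop step, on the extracted key-value
def pvStepA (st : PySem.Dict String Int × Int) (v : String) : PySem.Dict String Int × Int :=
  if st.1.contains v then st else (st.1.insert v st.2, st.2 + 1)

lemma pv_keys_swap_enumerate (l : List String) :
    (PySem.Dict.mk ((PySem.List.enumerate l 0).map (fun p => (p.2, p.1)))).keys = l := by
  simp [PySem.Dict.keys, List.map_map, Function.comp_def, PySem.List.map_snd_enumerate]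

-- loop invariant for A: after folding the value list, the dict's items are exactly
-- the swapped enumeration of the deduped values, and the counter is their count
lemma pv_foldl_stepA (vals : List String) :
    vals.foldl pvStepA (PySem.Dict.empty, 0) =
      (PySem.Dict.mk ((PySem.List.enumerate (PySem.List.dedup vals) 0).map (fun p => (p.2, p.1))),
        ((PySem.List.dedup vals).length : Int)) := by
  induction vals using List.reverseRecOn with
  | nil => simp [PySem.List.dedup, PySem.Set.ofList]; rfl
  | append_singleton l x ih =>
    have hded : PySem.List.dedup (l ++ [x]) = PySem.Set.add (PySem.List.dedup l) x := by
      simp [PySem.List.dedup_eq_ofList, PySem.Set.ofList_eq_foldl, List.foldl_append]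
    have hmem : (PySem.Dict.mk ((PySem.List.enumerate (PySem.List.dedup l) 0).map
        (fun p => (p.2, p.1)))).contains x = true ↔ x ∈ l := by
      rw [PySem.Dict.contains_iff_mem_keys, pv_keys_swap_enumerate, PySem.List.mem_dedup]
    rw [List.foldl_append, ih]
    by_cases hx : x ∈ l
    · have hc : (PySem.Dict.mk ((PySem.List.enumerate (PySem.List.dedup l) 0).map
          (fun p => (p.2, p.1)))).contains x = true := hmem.mpr hx
      have hadd : PySem.Set.add (PySem.List.dedup l) x = PySem.List.dedup l := by
        simp [PySem.Set.add, PySem.Set.contains, hx]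
      simp only [List.foldl_cons, List.foldl_nil, pvStepA, hc, if_true, hded, hadd]
    · have hc : (PySem.Dict.mk ((PySem.List.enumerate (PySem.List.dedup l) 0).map
          (fun p => (p.2, p.1)))).contains x = false := by
        rcases Bool.eq_false_or_eq_true ((PySem.Dict.mk ((PySem.List.enumerate (PySem.List.dedup l) 0).map (fun p => (p.2, p.1)))).contains x) with h | h
        · exact absurd (hmem.mp h) hx
        · exact h
      have hadd : PySem.Set.add (PySem.List.dedup l) x = PySem.List.dedup l ++ [x] := by
        simp [PySem.Set.add, PySem.Set.contains, hx]
      rw [hded, hadd]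
      simp only [List.foldl_cons, List.foldl_nil, pvStepA, hc, Bool.false_eq_true, if_false]
      refine Prod.ext ?_ (by simp)
      apply PySem.Dict.ext
      rw [PySem.Dict.items_insert_of_not_contains (h := hc)]
      simp [PySem.List.enumerate_append]

-- the first-occurrence-ordered dedup list is strictly increasing in first-occurrence index
lemma pv_dedup_pairwise_index (vals : List String) :
    (PySem.List.dedup vals).Pairwise
      (fun a b => (PySem.List.index? vals a).getD 0 < (PySem.List.index? vals b).getD 0) := by
  induction vals using List.reverseRecOn with
  | nil => simp [PySem.List.dedup, PySem.Set.ofList]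
  | append_singleton l x ih =>
    have hded : PySem.List.dedup (l ++ [x]) = PySem.Set.add (PySem.List.dedup l) x := by
      simp [PySem.List.dedup_eq_ofList, PySem.Set.ofList_eq_foldl, List.foldl_append]
    have hidx : ∀ v ∈ l, PySem.List.index? (l ++ [x]) v = PySem.List.index? l v :=
      fun v hv => PySem.List.index?_append_of_mem [x] hv
    by_cases hx : x ∈ l
    · have hadd : PySem.Set.add (PySem.List.dedup l) x = PySem.List.dedup l := by
        simp [PySem.Set.add, PySem.Set.contains, hx]
      rw [hded, hadd]
      refine ih.imp_of_mem ?_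
      intro a b ha hb hab
      rw [hidx a ((PySem.List.mem_dedup l a).mp ha), hidx b ((PySem.List.mem_dedup l b).mp hb)]
      exact hab
    · have hadd : PySem.Set.add (PySem.List.dedup l) x = PySem.List.dedup l ++ [x] := by
        simp [PySem.Set.add, PySem.Set.contains, hx]
      rw [hded, hadd]
      rw [List.pairwise_append]
      refine ⟨ih.imp_of_mem ?_, List.pairwise_singleton _ _, ?_⟩
      · intro a b ha hb hab
        rw [hidx a ((PySem.List.mem_dedup l a).mp ha), hidx b ((PySem.List.mem_dedup l b).mp hb)]
        exact hab
      · intro a ha b hb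
        rw [List.mem_singleton] at hb
        subst hb
        have hal : a ∈ l := (PySem.List.mem_dedup l a).mp ha
        -- index of a is some k with k < l.length; index of x is l.length
        have hsome : (PySem.List.index? l a).isSome := (PySem.List.index?_isSome_iff l a).mpr hal
        obtain ⟨k, hk⟩ := Option.isSome_iff_exists.mp hsome
        obtain ⟨hklt, -, -⟩ := PySem.List.getElem_of_index?_eq_some hk
        rw [hidx a hal, hk, PySem.List.index?_append_singleton_self l b hx]
        simpa using hklt

-- sorted(set(vals), key=vals.index) is exactly the first-occurrence dedup list
lemma pv_sorted_set_eq_dedup (vals : List String) :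
    PySem.List.sorted (PySem.Set.ofList vals)
      (fun v => (PySem.List.index? vals v).getD 0) false = PySem.List.dedup vals := by
  apply PySem.List.sorted_eq_of_perm_of_pairwise_lt
  · rw [← PySem.List.dedup_eq_ofList]
  · exact pv_dedup_pairwise_index vals

-- ===== VERDICT (by name: the statement is the Claim_ definition above) =====
theorem label_string_spec : Claim_equal_label_string := by
  intro items key _ _
  unfold Spec_label_string label_string label_string_alt
  show (items.foldl (fun st item => pvStepA st (pvItemGet item key)) (PySem.Dict.empty, 0)).1.items = _
  rw [← List.foldl_map (f := fun item => pvItemGet item key) (g := pvStepA), pv_foldl_stepA,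
    ← pv_sorted_set_eq_dedup]
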